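-- pv_equiv track=rewrite | github.com/Chicken47/thesis-server | analysis/prompt_builder.py | _find_row_by_label
-- ===== SOURCE A (Python) =====
-- def _find_row_by_label(values: list, label: str) -> dict | None:
--     """Find first row whose category starts with or contains the label (case-insensitive)."""
--     label_lower = label.lower()
--     # Exact-start match first
--     for row in values:
--         cat = row.get("category", "").lower().strip().rstrip("+").strip()
--         if cat.startswith(label_lower):
--             return row
--     # Fallback: substring match
--     for row in values:
--         cat = row.get("category", "").lower()
--         if label_lower in cat:
--             return row
--     return None
-- ===== SOURCE B (Python) =====
-- def _find_row_by_label(values: list, label: str) -> dict | None: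
--     """Single pass: return immediately on a startswith match; remember the first
--     substring match as a fallback and return it (or None) after the loop."""
--     label_lower = label.lower()
--     fallback = None
--     for row in values:
--         cat_raw = row.get("category", "").lower()
--         if cat_raw.strip().rstrip("+").strip().startswith(label_lower):
--             return row
--         if fallback is None and label_lower in cat_raw:
--             fallback = row
--     return fallback
-- ===== Notes on version B (the rewrite author's own statement) =====
-- stated objective: simpler
-- what changed: Replaces A's two sequential scans over values with a single loop that returns immediately on a startswith match and carries the first substring match as a fallback accumulator.
import Mathlib
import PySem

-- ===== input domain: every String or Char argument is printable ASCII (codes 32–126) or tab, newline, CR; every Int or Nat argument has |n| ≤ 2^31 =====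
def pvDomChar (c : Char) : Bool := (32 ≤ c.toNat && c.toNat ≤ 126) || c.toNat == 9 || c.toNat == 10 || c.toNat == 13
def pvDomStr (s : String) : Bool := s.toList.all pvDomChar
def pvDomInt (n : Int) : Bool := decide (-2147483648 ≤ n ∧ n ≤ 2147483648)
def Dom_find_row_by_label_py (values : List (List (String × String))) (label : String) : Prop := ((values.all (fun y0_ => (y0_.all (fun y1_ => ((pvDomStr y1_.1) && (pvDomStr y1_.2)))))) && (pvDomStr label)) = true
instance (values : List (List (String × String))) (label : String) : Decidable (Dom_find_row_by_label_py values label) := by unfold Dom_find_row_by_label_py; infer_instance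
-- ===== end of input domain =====

-- B changes: one pass with a fallback accumulator instead of A's two sequential scans (objective: simpler).

-- ===== PORT A =====
-- rstrip("+"): drop trailing '+' characters; exact for this fixed one-character chars argument.
def pvRstripPlus (s : String) : String :=
  String.ofList ((s.toList.reverse.dropWhile (fun c => c == '+')).reverse)

-- row.get("category", "").lower().strip().rstrip("+").strip()
def pvCatNorm (row : List (String × String)) : String :=
  PySem.Str.strip (pvRstripPlus (PySem.Str.strip (PySem.Str.lower (PySem.Dict.getD (PySem.Dict.mk row) "category" ""))))

-- row.get("category", "").lower()
def pvCatLower (row : List (String × String)) : String :=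
  PySem.Str.lower (PySem.Dict.getD (PySem.Dict.mk row) "category" "")

-- first loop of A: exact-start match
def pvLoop1 (values : List (List (String × String))) (ll : String) : Option (List (String × String)) :=
  match values with
  | [] => none
  | row :: rest => if PySem.Str.startswith (pvCatNorm row) ll then some row else pvLoop1 rest ll

-- second loop of A: substring match
def pvLoop2 (values : List (List (String × String))) (ll : String) : Option (List (String × String)) :=
  match values with
  | [] => none
  | row :: rest => if PySem.Str.isIn ll (pvCatLower row) then some row else pvLoop2 rest ll

def find_row_by_label_py (values : List (List (String × String))) (label : String) : Option (List (String × String)) :=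
  let ll := PySem.Str.lower label
  match pvLoop1 values ll with
  | some row => some row
  | none => pvLoop2 values ll

-- ===== PORT B =====
-- single loop: return on startswith, carry first substring match as fallback
def pvLoopB (values : List (List (String × String))) (ll : String)
    (fallback : Option (List (String × String))) : Option (List (String × String)) :=
  match values with
  | [] => fallback
  | row :: rest =>
    let catRaw := PySem.Str.lower (PySem.Dict.getD (PySem.Dict.mk row) "category" "")
    if PySem.Str.startswith (PySem.Str.strip (pvRstripPlus (PySem.Str.strip catRaw))) ll then some row
    else pvLoopB rest ll (if fallback == none && PySem.Str.isIn ll catRaw then some row else fallback)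

def find_row_by_label_py_alt (values : List (List (String × String))) (label : String) : Option (List (String × String)) :=
  pvLoopB values (PySem.Str.lower label) none

-- ===== PRECONDITION & SPEC =====
def Spec_find_row_by_label_py (values : List (List (String × String))) (label : String) (out : Option (List (String × String))) : Prop := out = find_row_by_label_py_alt values label
instance (values : List (List (String × String))) (label : String) (out : Option (List (String × String))) : Decidable (Spec_find_row_by_label_py values label out) := by unfold Spec_find_row_by_label_py; infer_instance

-- ===== CLAIM (what is proved, stated in full; the proofs are below) =====
def Claim_equal_find_row_by_label_py : Prop := ∀ (values : List (List (String × String))) (label : String), Dom_find_row_by_label_py values label → Spec_find_row_by_label_py values label (find_row_by_label_py values label)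

-- ===== LEMMAS AND PROOFS =====
-- loop invariant: B's single loop equals "loop1, else fallback, else loop2"
theorem pvLoopB_eq (values : List (List (String × String))) (ll : String) :
    ∀ fb, pvLoopB values ll fb =
      match pvLoop1 values ll with
      | some row => some row
      | none => match fb with
                | some f => some f
                | none => pvLoop2 values ll := by
  induction values with
  | nil => intro fb; cases fb <;> rfl
  | cons row rest ih =>
    intro fb
    simp only [pvLoopB, pvLoop1, pvLoop2, pvCatNorm, pvCatLower]
    by_cases hc1 : PySem.Str.startswith (PySem.Str.strip (pvRstripPlus (PySem.Str.strip
        (PySem.Str.lower (PySem.Dict.getD (PySem.Dict.mk row) "category" ""))))) ll = true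
    · simp only [hc1, reduceIte]
    · simp only [Bool.not_eq_true] at hc1
      simp only [hc1, Bool.false_eq_true, reduceIte]
      rw [ih]
      cases hl : pvLoop1 rest ll with
      | some r => rfl
      | none =>
        cases fb with
        | some f => simp
        | none =>
          by_cases hc2 : PySem.Str.isIn ll
              (PySem.Str.lower (PySem.Dict.getD (PySem.Dict.mk row) "category" "")) = true
          · simp only [hc2, Bool.and_true, reduceIte]
            simp
          · simp only [Bool.not_eq_true] at hc2
            simp only [hc2, Bool.and_false, Bool.false_eq_true, reduceIte]

-- ===== VERDICT (by name: the statement is the Claim_ definition above) =====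
theorem find_row_by_label_py_spec : Claim_equal_find_row_by_label_py := by
  intro values label _
  unfold Spec_find_row_by_label_py find_row_by_label_py find_row_by_label_py_alt
  rw [pvLoopB_eq values (PySem.Str.lower label) none]
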